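-- pv_equiv track=rewrite | github.com/vedika112005/Role-Auto-Classification-and-Chatbot-Isolation | part1_role_classification.py | clean_source_value
-- ===== SOURCE A (Python) =====
-- def clean_source_value(raw_value):
--     """
--     Takes a raw string from the CSV and cleans it up so we can
--     do a reliable lookup in our role_rules dictionary.
--
--     Returns None if the value is empty or missing entirely.
--     """
--     if raw_value is None:
--         return None
--
--     # strip() removes leading and trailing spaces/tabs/newlines
--     cleaned = raw_value.strip()
--
--     # if after stripping there's nothing left, treat it as missing
--     if cleaned == "":
--         return None
--
--     # lowercase so "BUYER", "Buyer", "buyer" all become "buyer"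
--     cleaned = cleaned.lower()
--
--     # handle double spaces — keep replacing until there are none
--     while "  " in cleaned:
--         cleaned = cleaned.replace("  ", " ")
--
--     return cleaned
-- ===== SOURCE B (Python) =====
-- def clean_source_value(raw_value):
--     if raw_value is None:
--         return None
--     cleaned = raw_value.strip()
--     if cleaned == "":
--         return None
--     cleaned = cleaned.lower()
--     out = []
--     prev = None
--     for ch in cleaned:
--         if ch == " " and prev == " ":
--             continue
--         out.append(ch)
--         prev = ch
--     return "".join(out)
-- ===== Notes on version B (the rewrite author's own statement) =====
-- stated objective: alternative
-- what changed: Replaced the repeated whole-string double-space-replace while-loop with a single linear scan that appends each character unless it is a space immediately following a kept space.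
import Mathlib
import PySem

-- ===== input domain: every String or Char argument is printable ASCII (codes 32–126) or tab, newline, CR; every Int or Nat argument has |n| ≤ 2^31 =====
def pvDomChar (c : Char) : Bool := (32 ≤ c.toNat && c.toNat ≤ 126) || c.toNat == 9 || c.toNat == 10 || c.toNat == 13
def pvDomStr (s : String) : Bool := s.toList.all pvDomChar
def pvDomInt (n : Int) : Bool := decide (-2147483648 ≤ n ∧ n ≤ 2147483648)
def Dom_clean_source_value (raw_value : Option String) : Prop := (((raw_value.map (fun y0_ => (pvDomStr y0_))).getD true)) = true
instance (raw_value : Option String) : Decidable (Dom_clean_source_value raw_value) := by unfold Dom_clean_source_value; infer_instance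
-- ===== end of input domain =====

-- B replaces A's repeated replace("  "," ") while-loop by one linear scan that skips a space following a kept space (alternative algorithm, same results).


-- ===== PORT A =====
-- proof-only helper: one left-to-right pass of cleaned.replace("  ", " ").
-- It is needed ABOVE the port because cleanALoop's termination proof cites
-- rpass_len_lt / replace_eq_rpass by name; the port itself calls PySem.Chars.replace.
def rpass : List Char → List Char
  | [] => []
  | ' ' :: ' ' :: t => ' ' :: rpass t
  | c :: t => c :: rpass t

theorem rpass_cons₂ (c b : Char) (t : List Char) (h : ¬ (c = ' ' ∧ b = ' ')) :
    rpass (c :: b :: t) = c :: rpass (b :: t) := by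
  rw [rpass.eq_def]; split <;> simp_all

theorem rpass_len_le (cs : List Char) : (rpass cs).length ≤ cs.length := by
  fun_induction rpass cs <;> simp_all <;> omega

theorem rpass_len_lt (cs : List Char) (h : [' ', ' '] <:+: cs) :
    (rpass cs).length < cs.length := by
  fun_induction rpass cs with
  | case1 => simp at h
  | case2 t ih =>
    have := rpass_len_le t
    simp; omega
  | case3 c t hne ih =>
    rcases List.infix_cons_iff.mp h with hp | hi
    · exfalso
      rcases hp with ⟨r, hr⟩
      cases t with
      | nil => simp at hr
      | cons b t' =>
        injection hr with h1 h2; injection h2 with h3 h4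
        exact hne t' h1.symm (by rw [← h3])
    · simpa using ih hi

theorem replace_go_eq_rpass : ∀ (fuel : Nat) (l acc : List Char), l.length ≤ fuel →
    PySem.Chars.replace.go [' ', ' '] [' '] fuel l acc = acc.reverse ++ rpass l := by
  intro fuel
  induction fuel with
  | zero =>
    intro l acc hl
    have : l = [] := List.length_eq_zero_iff.mp (Nat.le_zero.mp hl)
    subst this; simp [PySem.Chars.replace.go, rpass]
  | succ n ih =>
    intro l acc hl
    match l with
    | [] => simp [PySem.Chars.replace.go, rpass]
    | [c] =>
      have hpre : [' ', ' '].isPrefixOf [c] = false := by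
        simp [List.isPrefixOf]
      rw [PySem.Chars.replace.go, hpre]
      simp only [Bool.false_eq_true, if_false]
      rw [ih [] (c :: acc) (by simp)]
      simp [rpass]
    | c :: b :: t =>
      by_cases hd : c = ' ' ∧ b = ' '
      · obtain ⟨hc, hb⟩ := hd; subst hc; subst hb
        have hpre : [' ', ' '].isPrefixOf (' ' :: ' ' :: t) = true := by
          simp [List.isPrefixOf]
        rw [PySem.Chars.replace.go, hpre]
        simp only [if_true]
        rw [ih]
        · simp [rpass]
        · simp at hl ⊢; omega
      · have hpre : [' ', ' '].isPrefixOf (c :: b :: t) = false := by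
          simp [List.isPrefixOf]
          intro h1 h2
          exact absurd ⟨h1.symm, h2.symm⟩ hd
        rw [PySem.Chars.replace.go, hpre]
        simp only [Bool.false_eq_true, if_false]
        rw [ih (b :: t) (c :: acc) (by simp at hl ⊢; omega)]
        rw [rpass_cons₂ c b t hd]
        simp

theorem replace_eq_rpass (cs : List Char) :
    PySem.Chars.replace cs [' ', ' '] [' '] = rpass cs := by
  have := replace_go_eq_rpass cs.length cs [] le_rfl
  simpa [PySem.Chars.replace] using this

-- the `while "  " in cleaned: cleaned = cleaned.replace("  ", " ")` loop of A
def cleanALoop (cs : List Char) : List Char :=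
  if h : PySem.Chars.isIn [' ', ' '] cs then
    cleanALoop (PySem.Chars.replace cs [' ', ' '] [' '])
  else cs
termination_by cs.length
decreasing_by
  rw [replace_eq_rpass]
  exact rpass_len_lt cs ((PySem.Chars.isIn_iff_infix [' ', ' '] cs).mp h)

def clean_source_value (raw_value : Option String) : Option String :=
  match raw_value with
  | none => none
  | some raw =>
    let cleaned := PySem.Chars.strip raw.toList
    if cleaned = [] then none
    else some (String.ofList (cleanALoop (PySem.Chars.lower cleaned)))

-- ===== PORT B =====
def clean_source_value_alt (raw_value : Option String) : Option String :=
  match raw_value with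
  | none => none
  | some raw =>
    let cleaned := PySem.Chars.strip raw.toList
    if cleaned = [] then none
    else
      -- single pass: out grows by ch unless ch is a space whose previously kept char was a space
      let st := (PySem.Chars.lower cleaned).foldl
        (fun (st : List Char × Option Char) ch =>
          if ch = ' ' ∧ st.2 = some ' ' then st else (st.1 ++ [ch], some ch))
        ([], none)
      some (String.ofList st.1)

-- ===== PRECONDITION & SPEC =====
def Spec_clean_source_value (raw_value : Option String) (out : Option String) : Prop := out = clean_source_value_alt raw_value
instance (raw_value : Option String) (out : Option String) : Decidable (Spec_clean_source_value raw_value out) := by unfold Spec_clean_source_value; infer_instance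

-- ===== CLAIM (what is proved, stated in full; the proofs are below) =====
def Claim_equal_clean_source_value : Prop := ∀ (raw_value : Option String), Dom_clean_source_value raw_value → Spec_clean_source_value raw_value (clean_source_value raw_value)

-- ===== LEMMAS AND PROOFS =====
-- B's scan as a plain recursion with the previously kept character as state
def go2 (p : Option Char) : List Char → List Char
  | [] => []
  | c :: t => if c = ' ' ∧ p = some ' ' then go2 p t else c :: go2 (some c) t

theorem foldl_eq_go2 (cs acc : List Char) (p : Option Char) :
    (cs.foldl (fun (st : List Char × Option Char) ch =>
        if ch = ' ' ∧ st.2 = some ' ' then st else (st.1 ++ [ch], some ch))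
      (acc, p)).1 = acc ++ go2 p cs := by
  induction cs generalizing acc p with
  | nil => simp [go2]
  | cons c t ih =>
    simp only [List.foldl, go2]
    by_cases h : c = ' ' ∧ p = some ' '
    · simp [h, ih]
    · simp [h, ih]

theorem go2_rpass (cs : List Char) : ∀ (p : Option Char), go2 p (rpass cs) = go2 p cs := by
  fun_induction rpass cs with
  | case1 => intro p; rfl
  | case2 t ih =>
    intro p
    by_cases h : p = some ' '
    · simp [go2, h, ih]
    · simp [go2, h, ih]
  | case3 c t hne ih =>
    intro p
    by_cases h : c = ' ' ∧ p = some ' '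
    · simp [go2, h, ih]
    · simp [go2, h, ih]

theorem go2_id (cs : List Char) : ∀ (p : Option Char), ¬ ([' ', ' '] <:+: cs) →
    (p = some ' ' → cs.head? ≠ some ' ') → go2 p cs = cs := by
  induction cs with
  | nil => intro p _ _; rfl
  | cons c t ih =>
    intro p hin hp
    have hnd : ¬ ([' ', ' '] <:+: t) := fun h => hin (List.infix_cons_iff.mpr (Or.inr h))
    have hcase : ¬ (c = ' ' ∧ p = some ' ') := by
      rintro ⟨hc, hps⟩
      exact hp hps (by simp [hc])
    simp only [go2, if_neg hcase]
    congr 1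
    apply ih (some c) hnd
    intro hcs hh
    apply hin
    apply List.infix_cons_iff.mpr (Or.inl _)
    injection hcs with hc
    cases t with
    | nil => simp at hh
    | cons b t' =>
      simp at hh
      exact ⟨t', by simp [hc, hh]⟩

theorem cleanALoop_eq_go2 (cs : List Char) : cleanALoop cs = go2 none cs := by
  fun_induction cleanALoop cs with
  | case1 cs h ih =>
    rw [ih, replace_eq_rpass, go2_rpass]
  | case2 cs h =>
    rw [go2_id]
    · exact (PySem.Chars.isIn_eq_false_iff [' ', ' '] cs).mp (by simpa using h)
    · simp

-- ===== VERDICT (by name: the statement is the Claim_ definition above) =====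
theorem clean_source_value_spec : Claim_equal_clean_source_value := by
  intro raw_value _
  unfold Spec_clean_source_value clean_source_value clean_source_value_alt
  cases raw_value with
  | none => rfl
  | some raw =>
    simp only
    split
    · rfl
    · rw [foldl_eq_go2, cleanALoop_eq_go2]
      simp
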